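-- pv_equiv track=rewrite | github.com/as3contender/x5-ner | ner/postprocess.py | merge_across_joiners
-- ===== SOURCE A (Python) =====
-- from typing import List, Tuple, Set
--
-- def merge_across_joiners(
--     text: str,
--     entities: List[Tuple[int, int, str]],
--     joiners: Tuple[str, ...] = ("-", "–", "—", ".", "+", "/"),
--     allow_spaces: bool = True,
-- ) -> List[Tuple[int, int, str]]:
--     """
--     Склеивает соседние спаны одной сущности (TYPE/BRAND), если между ними только
--     символы-соединители (joiners) и, опционально, пробелы.
--     BIO сохраняем: оставляем предыдущий B-*, просто расширяем его end.
--     """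
--     if not entities:
--         return entities
--
--     def base(tag: str) -> str:
--         return tag.split("-", 1)[-1] if "-" in tag else tag
--
--     def gap_is_joiners(prev_end: int, cur_start: int) -> bool:
--         gap = text[prev_end:cur_start]
--         if not gap:
--             return True
--         for ch in gap:
--             if allow_spaces and ch.isspace():
--                 continue
--             if ch in joiners:
--                 continue
--             return False
--         return True
--
--     ents = sorted(entities, key=lambda x: (x[0], x[1]))
--     out: List[Tuple[int, int, str]] = []
--
--     for s, e, t in ents:
--         b = base(t).upper()
--         if out and base(out[-1][2]).upper() == b and gap_is_joiners(out[-1][1], s):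
--             # расширяем предыдущий спан; метка остаётся как была (обычно B-*)
--             out[-1] = (out[-1][0], e, out[-1][2])
--         else:
--             out.append((s, e, t))
--     return out
-- ===== SOURCE B (Python) =====
-- from typing import List, Tuple
--
--
-- def _base(tag: str) -> str:
--     return tag.split("-", 1)[-1] if "-" in tag else tag
--
--
-- def _gap_ok(text: str, joiners, allow_spaces: bool, prev_end: int, cur_start: int) -> bool:
--     for ch in text[prev_end:cur_start]:
--         if allow_spaces and ch.isspace():
--             continue
--         if ch in joiners:
--             continue
--         return False
--     return True
--
--
-- def _mergeable(text, joiners, allow_spaces, prev, cur) -> bool: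
--     return (_base(prev[2]).upper() == _base(cur[2]).upper()
--             and _gap_ok(text, joiners, allow_spaces, prev[1], cur[0]))
--
--
-- def merge_across_joiners(
--     text: str,
--     entities: List[Tuple[int, int, str]],
--     joiners: Tuple[str, ...] = ("-", "–", "—", ".", "+", "/"),
--     allow_spaces: bool = True,
-- ) -> List[Tuple[int, int, str]]:
--     # Boundary-index algorithm, no accumulator: compute the break positions
--     # (indices where a sorted span is NOT mergeable with its immediate
--     # predecessor), then emit one span per boundary pair by direct indexing.
--     if not entities:
--         return entities
--     ents = sorted(entities, key=lambda x: (x[0], x[1]))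
--     n = len(ents)
--     breaks = [i for i, (p, c) in enumerate(zip(ents, ents[1:]), 1)
--               if not _mergeable(text, joiners, allow_spaces, p, c)]
--     bounds = [0] + breaks + [n]
--     return [(ents[b][0], ents[c - 1][1], ents[b][2])
--             for b, c in zip(bounds, bounds[1:])]
-- ===== Notes on version B (the rewrite author's own statement) =====
-- stated objective: alternative
-- what changed: A builds the output incrementally in a single pass, mutating the last appended span in place to extend it; B uses a boundary-index algorithm with no accumulator: it first computes the list of break positions (indices where a sorted span is not mergeable with its immediate predecessor), forms the bounds list [0]+breaks+[n], and then emits one span per adjacent bounds pair by direct indexing into the sorted list.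
import Mathlib
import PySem

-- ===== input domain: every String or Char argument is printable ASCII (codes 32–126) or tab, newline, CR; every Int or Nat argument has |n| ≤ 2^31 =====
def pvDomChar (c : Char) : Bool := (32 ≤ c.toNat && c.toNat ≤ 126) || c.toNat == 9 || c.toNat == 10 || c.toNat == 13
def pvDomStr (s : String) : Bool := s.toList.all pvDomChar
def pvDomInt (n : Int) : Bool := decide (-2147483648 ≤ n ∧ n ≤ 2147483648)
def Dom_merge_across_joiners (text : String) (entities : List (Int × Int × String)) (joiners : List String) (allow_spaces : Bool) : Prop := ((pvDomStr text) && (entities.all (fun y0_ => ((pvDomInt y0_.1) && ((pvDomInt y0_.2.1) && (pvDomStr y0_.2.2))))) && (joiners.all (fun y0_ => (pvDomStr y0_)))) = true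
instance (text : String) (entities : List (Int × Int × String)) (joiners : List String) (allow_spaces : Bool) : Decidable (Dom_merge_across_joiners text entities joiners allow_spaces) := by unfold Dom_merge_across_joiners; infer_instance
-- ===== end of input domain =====

-- B replaces A's accumulator loop (which mutates the last output span in place) by a
-- boundary-index algorithm: compute break positions, then emit one span per bounds pair
-- by direct indexing; objective: alternative decomposition, same cost.

-- ===== PORT A =====
-- base(tag) = tag.split("-", 1)[-1] if "-" in tag else tag   (shared: Source B's _base is the same code)
def pvBase (tag : String) : String :=
  if PySem.Str.isIn "-" tag then
    ((PySem.Str.splitMax? tag "-" 1).getD []).getLastD ""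
  else tag

-- base(t).upper()
def pvBaseU (tag : String) : String := PySem.Str.upper (pvBase tag)

-- the for-loop of gap_is_joiners over the characters of the gap (shared with Source B's _gap_ok)
def pvGapLoop (joiners : List String) (allow_spaces : Bool) : List Char → Bool
  | [] => true
  | ch :: rest =>
    if allow_spaces && PySem.Chars.isspace ch then pvGapLoop joiners allow_spaces rest
    else if joiners.contains (String.ofList [ch]) then pvGapLoop joiners allow_spaces rest
    else false

-- gap_is_joiners(prev_end, cur_start); the 'if not gap: return True' branch coincides with the loop on []
def pvGapOk (text : String) (joiners : List String) (allow_spaces : Bool) (prev_end cur_start : Int) : Bool :=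
  pvGapLoop joiners allow_spaces (PySem.Str.slice text (some prev_end) (some cur_start)).toList

-- the main for-loop of A over the sorted entities, with its output list `out`
def pvALoop (text : String) (joiners : List String) (allow_spaces : Bool)
    (out : List (Int × Int × String)) : List (Int × Int × String) → List (Int × Int × String)
  | [] => out
  | (s, e, t) :: rest =>
    match out.getLast? with
    | some last =>
      if pvBaseU last.2.2 == pvBaseU t && pvGapOk text joiners allow_spaces last.2.1 s then
        pvALoop text joiners allow_spaces (out.dropLast ++ [(last.1, e, last.2.2)]) rest
      else
        pvALoop text joiners allow_spaces (out ++ [(s, e, t)]) rest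
    | none => pvALoop text joiners allow_spaces (out ++ [(s, e, t)]) rest

def merge_across_joiners (text : String) (entities : List (Int × Int × String)) (joiners : List String) (allow_spaces : Bool) : List (Int × Int × String) :=
  if entities = [] then entities
  else pvALoop text joiners allow_spaces []
    (PySem.List.sorted2 entities (fun x => x.1) (fun x => x.2.1))

-- ===== PORT B =====
-- _mergeable(prev, cur)
def pvMergeable (text : String) (joiners : List String) (allow_spaces : Bool)
    (prev cur : Int × Int × String) : Bool :=
  pvBaseU prev.2.2 == pvBaseU cur.2.2 && pvGapOk text joiners allow_spaces prev.2.1 cur.1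

-- the breaks comprehension: [i for i, (p, c) in enumerate(pairs, s) if not _mergeable(…, p, c)]
def pvBrk (text : String) (joiners : List String) (allow_spaces : Bool) (s : Int)
    (pairs : List ((Int × Int × String) × (Int × Int × String))) : List Int :=
  (PySem.List.enumerate pairs s).filterMap
    (fun ic => if pvMergeable text joiners allow_spaces ic.2.1 ic.2.2 then none else some ic.1)

-- the emitted tuple (ents[b][0], ents[c-1][1], ents[b][2]) for one bounds pair (b, c)
def pvEmitAt (ents : List (Int × Int × String)) (bc : Int × Int) : Int × Int × String :=
  ((PySem.List.pyGetD ents bc.1 (0, 0, "")).1,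
   (PySem.List.pyGetD ents (bc.2 - 1) (0, 0, "")).2.1,
   (PySem.List.pyGetD ents bc.1 (0, 0, "")).2.2)

def merge_across_joiners_alt (text : String) (entities : List (Int × Int × String)) (joiners : List String) (allow_spaces : Bool) : List (Int × Int × String) :=
  if entities = [] then entities
  else
    let ents := PySem.List.sorted2 entities (fun x => x.1) (fun x => x.2.1)
    let n : Int := ents.length
    let breaks := pvBrk text joiners allow_spaces 1 (ents.zip (PySem.List.slice ents (some 1) none))
    let bounds := (0 : Int) :: breaks ++ [n]
    (bounds.zip bounds.tail).map (pvEmitAt ents)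

-- ===== PRECONDITION & SPEC =====
def Spec_merge_across_joiners (text : String) (entities : List (Int × Int × String)) (joiners : List String) (allow_spaces : Bool) (out : List (Int × Int × String)) : Prop := out = merge_across_joiners_alt text entities joiners allow_spaces
instance (text : String) (entities : List (Int × Int × String)) (joiners : List String) (allow_spaces : Bool) (out : List (Int × Int × String)) : Decidable (Spec_merge_across_joiners text entities joiners allow_spaces out) := by unfold Spec_merge_across_joiners; infer_instance

-- ===== CLAIM (what is proved, stated in full; the proofs are below) =====
def Claim_equal_merge_across_joiners : Prop := ∀ (text : String) (entities : List (Int × Int × String)) (joiners : List String) (allow_spaces : Bool), Dom_merge_across_joiners text entities joiners allow_spaces → Spec_merge_across_joiners text entities joiners allow_spaces (merge_across_joiners text entities joiners allow_spaces)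

-- ===== LEMMAS AND PROOFS =====

-- proof-only: the maximal runs of pairwise-mergeable neighbours of a::l, carried element a
def pvChunks (text : String) (joiners : List String) (allow_spaces : Bool)
    (a : Int × Int × String) : List (Int × Int × String) → List (List (Int × Int × String))
  | [] => [[a]]
  | b :: rest =>
    if pvMergeable text joiners allow_spaces a b then
      match pvChunks text joiners allow_spaces b rest with
      | [] => [[a]]
      | c :: cs => (a :: c) :: cs
    else [a] :: pvChunks text joiners allow_spaces b rest

-- proof-only: (c[0][0], c[-1][1], c[0][2]) of one chunk
def pvEmit (c : List (Int × Int × String)) : Int × Int × String :=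
  ((c.headD (0, 0, "")).1, (c.getLastD (0, 0, "")).2.1, (c.headD (0, 0, "")).2.2)

-- proof-only helper: emit a chunk list whose first chunk's start/tag are overridden
def pvEmitFirst (gs : Int) (gt : String) : List (List (Int × Int × String)) → List (Int × Int × String)
  | [] => []
  | c :: cs => (gs, (c.getLastD (0, 0, "")).2.1, gt) :: cs.map pvEmit

-- proof-only: break positions read off the chunk structure
def pvChunkBrk (s : Int) : List (List (Int × Int × String)) → List Int
  | [] => []
  | [_] => []
  | c :: c' :: cs => (s + (c.length : Int) - 1) :: pvChunkBrk (s + (c.length : Int)) (c' :: cs)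

-- proof-only: the bounds tail (prefix sums of chunk lengths after offset off)
def pvBndAux (off : Int) : List (List (Int × Int × String)) → List Int
  | [] => []
  | c :: cs => (off + (c.length : Int)) :: pvBndAux (off + (c.length : Int)) cs

-- every chunk list starts with a chunk headed by the carried element
theorem pvChunks_shape (text : String) (joiners : List String) (allow_spaces : Bool) :
    ∀ (l : List (Int × Int × String)) (a : Int × Int × String),
      ∃ c cs, pvChunks text joiners allow_spaces a l = (a :: c) :: cs := by
  intro l
  induction l with
  | nil => intro a; exact ⟨[], [], rfl⟩
  | cons b rest ih =>
    intro a
    obtain ⟨c, cs, h⟩ := ih b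
    by_cases hm : pvMergeable text joiners allow_spaces a b
    · exact ⟨b :: c, cs, by simp [pvChunks, hm, h]⟩
    · exact ⟨[], pvChunks text joiners allow_spaces b rest, by simp [pvChunks, hm]⟩

theorem pvMap_emit_eq_emitFirst (text : String) (joiners : List String) (allow_spaces : Bool)
    (a : Int × Int × String) (l : List (Int × Int × String)) :
    (pvChunks text joiners allow_spaces a l).map pvEmit
      = pvEmitFirst a.1 a.2.2 (pvChunks text joiners allow_spaces a l) := by
  obtain ⟨c, cs, h⟩ := pvChunks_shape text joiners allow_spaces l a
  simp [h, pvEmit, pvEmitFirst]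

-- the A-loop invariant: out = acc ++ [current merged span] computes acc ++ emitted chunks,
-- provided the merged span's tag has the same upper base as the previous entity's tag
theorem pvMain (text : String) (joiners : List String) (allow_spaces : Bool) :
    ∀ (l acc : List (Int × Int × String)) (gs pe ps : Int) (gt pt : String),
      pvBaseU gt = pvBaseU pt →
      pvALoop text joiners allow_spaces (acc ++ [(gs, pe, gt)]) l
        = acc ++ pvEmitFirst gs gt (pvChunks text joiners allow_spaces (ps, pe, pt) l) := by
  intro l
  induction l with
  | nil => intro acc gs pe ps gt pt h; simp [pvALoop, pvChunks, pvEmitFirst]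
  | cons x rest ih =>
    intro acc gs pe ps gt pt h
    obtain ⟨s, e, t⟩ := x
    by_cases hm : (pvBaseU gt == pvBaseU t && pvGapOk text joiners allow_spaces pe s) = true
    · have hmerge : pvMergeable text joiners allow_spaces (ps, pe, pt) (s, e, t) = true := by
        simpa [pvMergeable, ← h] using hm
      have hbase : pvBaseU gt = pvBaseU t := by
        have h2 := hm
        simp only [Bool.and_eq_true, beq_iff_eq] at h2
        exact h2.1
      obtain ⟨c, cs, hc⟩ := pvChunks_shape text joiners allow_spaces rest (s, e, t)
      have hstep : pvALoop text joiners allow_spaces (acc ++ [(gs, pe, gt)]) ((s, e, t) :: rest)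
          = pvALoop text joiners allow_spaces (acc ++ [(gs, e, gt)]) rest := by
        simp [pvALoop, hm]
      rw [hstep, ih acc gs e s gt t hbase]
      simp only [pvChunks, hmerge, if_pos, hc]
      cases c with
      | nil => simp [pvEmitFirst]
      | cons y ys => simp [pvEmitFirst]
    · have hmerge : pvMergeable text joiners allow_spaces (ps, pe, pt) (s, e, t) = false := by
        simp only [pvMergeable] at *
        simpa [← h] using hm
      have hstep : pvALoop text joiners allow_spaces (acc ++ [(gs, pe, gt)]) ((s, e, t) :: rest)
          = pvALoop text joiners allow_spaces ((acc ++ [(gs, pe, gt)]) ++ [(s, e, t)]) rest := by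
        simp [pvALoop, hm]
      rw [hstep, ih (acc ++ [(gs, pe, gt)]) s e s t t rfl]
      obtain ⟨c, cs, hc⟩ := pvChunks_shape text joiners allow_spaces rest (s, e, t)
      simp only [pvChunks, hmerge, Bool.false_eq_true, if_false, hc]
      simp [pvEmitFirst, pvEmit]

-- unfolding pvBrk one pair at a time
theorem pvBrk_cons (text : String) (joiners : List String) (allow_spaces : Bool) (s : Int)
    (x y : Int × Int × String) (ps : List ((Int × Int × String) × (Int × Int × String))) :
    pvBrk text joiners allow_spaces s ((x, y) :: ps)
      = (if pvMergeable text joiners allow_spaces x y then [] else [s])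
          ++ pvBrk text joiners allow_spaces (s + 1) ps := by
  by_cases hm : pvMergeable text joiners allow_spaces x y <;>
    simp [pvBrk, PySem.List.enumerate_cons, hm]

-- the breaks of a::l are the chunk-boundary positions of its chunk decomposition
theorem pvBrk_eq_chunkBrk (text : String) (joiners : List String) (allow_spaces : Bool) :
    ∀ (l : List (Int × Int × String)) (a : Int × Int × String) (s : Int),
      pvBrk text joiners allow_spaces s ((a :: l).zip l)
        = pvChunkBrk s (pvChunks text joiners allow_spaces a l) := by
  intro l
  induction l with
  | nil => intro a s; simp [pvBrk, pvChunks, pvChunkBrk]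
  | cons b t ih =>
    intro a s
    have hz : (a :: b :: t).zip (b :: t) = (a, b) :: (b :: t).zip t := rfl
    rw [hz, pvBrk_cons, ih b (s + 1)]
    obtain ⟨c, cs, hc⟩ := pvChunks_shape text joiners allow_spaces t b
    by_cases hm : pvMergeable text joiners allow_spaces a b
    · simp only [hm, if_true, List.nil_append, pvChunks, hc]
      cases cs with
      | nil => simp [pvChunkBrk]
      | cons c' cs' =>
        simp only [pvChunkBrk, List.length_cons, List.cons.injEq]
        refine ⟨by push_cast; ring, ?_⟩
        congr 1
        push_cast; ring
    · simp only [hm, if_false, Bool.false_eq_true, pvChunks, hc]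
      simp [pvChunkBrk]

-- the chunks flatten back to the original list
theorem pvChunks_flatten (text : String) (joiners : List String) (allow_spaces : Bool) :
    ∀ (l : List (Int × Int × String)) (a : Int × Int × String),
      (pvChunks text joiners allow_spaces a l).flatten = a :: l := by
  intro l
  induction l with
  | nil => intro a; simp [pvChunks]
  | cons b t ih =>
    intro a
    obtain ⟨c, cs, hc⟩ := pvChunks_shape text joiners allow_spaces t b
    have hf : (b :: c) ++ cs.flatten = b :: t := by
      have := ih b; rw [hc] at this; simpa using this
    by_cases hm : pvMergeable text joiners allow_spaces a b
    · simp only [pvChunks, hm, if_true, hc, List.flatten_cons]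
      simpa using congrArg (a :: ·) hf
    · simp only [pvChunks, hm, if_false, Bool.false_eq_true, List.flatten_cons, hc]
      simpa using hf

-- no chunk is empty
theorem pvChunks_ne_nil (text : String) (joiners : List String) (allow_spaces : Bool) :
    ∀ (l : List (Int × Int × String)) (a : Int × Int × String) (c : List (Int × Int × String)),
      c ∈ pvChunks text joiners allow_spaces a l → c ≠ [] := by
  intro l
  induction l with
  | nil => intro a c hc; simp [pvChunks] at hc; simp [hc]
  | cons b t ih =>
    intro a c hc
    obtain ⟨c', cs, hsh⟩ := pvChunks_shape text joiners allow_spaces t b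
    by_cases hm : pvMergeable text joiners allow_spaces a b
    · rw [pvChunks, if_pos hm, hsh] at hc
      rcases (List.mem_cons).1 hc with h | h
      · simp [h]
      · exact ih b c (by rw [hsh]; exact List.mem_cons_of_mem _ h)
    · rw [pvChunks, if_neg hm] at hc
      rcases (List.mem_cons).1 hc with h | h
      · simp [h]
      · exact ih b c h

-- breaks ++ [total length] is the bounds tail
theorem pvChunkBrk_append_total :
    ∀ (chunks : List (List (Int × Int × String))), chunks ≠ [] → ∀ (off : Int),
      pvChunkBrk (off + 1) chunks ++ [off + (chunks.flatten.length : Int)] = pvBndAux off chunks := by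
  intro chunks
  induction chunks with
  | nil => intro h; exact absurd rfl h
  | cons c cs ih =>
    intro _ off
    cases cs with
    | nil => simp [pvChunkBrk, pvBndAux]
    | cons c' cs' =>
      have hrec := ih (by simp) (off + (c.length : Int))
      simp only [pvChunkBrk, pvBndAux, List.cons_append, List.flatten_cons, List.length_append,
        List.cons.injEq] at hrec ⊢
      push_cast at hrec ⊢
      refine ⟨by ring, ?_⟩
      rw [show off + 1 + (c.length : Int) = off + (c.length : Int) + 1 by ring]
      rw [show off + ((c.length : Int) + ((c'.length : Int) + (cs'.flatten.length : Int))) =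
            off + (c.length : Int) + ((c'.length : Int) + (cs'.flatten.length : Int)) by ring]
      exact hrec

-- emission over the bounds pairs equals pvEmit of each chunk
theorem pvEmitAt_bounds :
    ∀ (chunks : List (List (Int × Int × String))), (∀ c ∈ chunks, c ≠ []) →
    ∀ (pre xs : List (Int × Int × String)), xs = pre ++ chunks.flatten →
      ((((pre.length : Int)) :: pvBndAux (pre.length : Int) chunks).zip
          (pvBndAux (pre.length : Int) chunks)).map (pvEmitAt xs)
        = chunks.map pvEmit := by
  intro chunks
  induction chunks with
  | nil => intro _ pre xs _; simp [pvBndAux]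
  | cons c cs ih =>
    intro hne pre xs hxs
    have hcne : c ≠ [] := hne c (List.mem_cons_self ..)
    obtain ⟨y, t1, hy⟩ := List.exists_cons_of_ne_nil hcne
    have hz : c = c.dropLast ++ [c.getLast hcne] := (List.dropLast_append_getLast hcne).symm
    set t2 := c.dropLast with ht2
    set z := c.getLast hcne with hzz
    have hlen : (c.length : Int) = (t2.length : Int) + 1 := by
      rw [hz]; simp
    -- head access: xs[pre.length] = y
    have hhead : PySem.List.pyGetD xs ((pre.length : Int)) (0, 0, "") = y := by
      have : xs = pre ++ y :: (t1 ++ cs.flatten) := by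
        rw [hxs, hy]; simp
      rw [this]
      have hg := PySem.List.pyGet?_append_length (pre := pre) (y := y) (ys := t1 ++ cs.flatten)
      show (PySem.List.pyGet? _ _).getD _ = y
      rw [hg]; rfl
    -- last access: xs[pre.length + |c| - 1] = z
    have hlast : PySem.List.pyGetD xs ((pre.length : Int) + (c.length : Int) - 1) (0, 0, "") = z := by
      have hform : xs = (pre ++ t2) ++ z :: cs.flatten := by
        rw [hxs, hz]; simp
      have hidx : (pre.length : Int) + (c.length : Int) - 1 = (((pre ++ t2).length : Nat) : Int) := by
        rw [hlen]; simp [List.length_append]; ring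
      rw [hform, hidx]
      have hg := PySem.List.pyGet?_append_length (pre := pre ++ t2) (y := z) (ys := cs.flatten)
      show (PySem.List.pyGet? _ _).getD _ = z
      rw [hg]; rfl
    have hemit : pvEmitAt xs ((pre.length : Int), (pre.length : Int) + (c.length : Int)) = pvEmit c := by
      simp only [pvEmitAt, pvEmit]
      rw [hhead]
      rw [show ((pre.length : Int) + (c.length : Int)) - 1 = (pre.length : Int) + (c.length : Int) - 1 by ring, hlast]
      have hh : c.headD (0, 0, "") = y := by rw [hy]; rfl
      have hg : c.getLastD (0, 0, "") = z := by rw [hz]; simp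
      rw [hh, hg]
    have hpre' : ((pre ++ c).length : Int) = (pre.length : Int) + (c.length : Int) := by
      push_cast [List.length_append]; ring
    have hxs' : xs = (pre ++ c) ++ cs.flatten := by rw [hxs]; simp
    have htail := ih (fun c' hc' => hne c' (List.mem_cons_of_mem _ hc')) (pre ++ c) xs hxs'
    rw [hpre'] at htail
    simp only [pvBndAux, List.zip_cons_cons, List.map_cons]
    rw [hemit]
    exact congrArg (pvEmit c :: ·) htail

-- ===== VERDICT (by name: the statement is the Claim_ definition above) =====
theorem merge_across_joiners_spec : Claim_equal_merge_across_joiners := by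
  intro text entities joiners allow_spaces _
  unfold Spec_merge_across_joiners merge_across_joiners merge_across_joiners_alt
  by_cases he : entities = []
  · simp [he]
  · have hs : PySem.List.sorted2 entities (fun x => x.1) (fun x => x.2.1) ≠ [] := by
      intro hnil
      exact he ((hnil ▸ PySem.List.sorted2_perm entities (fun x => x.1) (fun x => x.2.1) false).symm.eq_nil)
    obtain ⟨a, l, hrw⟩ := List.exists_cons_of_ne_nil hs
    rw [if_neg he, if_neg he, hrw]
    obtain ⟨s, e, t⟩ := a
    -- A side: pvALoop = map pvEmit chunks
    have hA : pvALoop text joiners allow_spaces [] ((s, e, t) :: l)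
        = (pvChunks text joiners allow_spaces (s, e, t) l).map pvEmit := by
      have h0 : pvALoop text joiners allow_spaces [] ((s, e, t) :: l)
          = pvALoop text joiners allow_spaces ([] ++ [(s, e, t)]) l := by
        simp [pvALoop]
      rw [h0, pvMain text joiners allow_spaces l [] s e s t t rfl]
      exact (List.nil_append _).trans
        (pvMap_emit_eq_emitFirst text joiners allow_spaces (s, e, t) l).symm
    -- B side
    have hslice : PySem.List.slice ((s, e, t) :: l) (some 1) none = l := by
      simpa using PySem.List.slice_from_one ((s, e, t) :: l)
    have hbrk := pvBrk_eq_chunkBrk text joiners allow_spaces l (s, e, t) 1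
    set chunks := pvChunks text joiners allow_spaces (s, e, t) l with hch
    have hchne : chunks ≠ [] := by
      obtain ⟨c, cs, hc⟩ := pvChunks_shape text joiners allow_spaces l (s, e, t)
      rw [hch, hc]; simp
    have hflat : chunks.flatten = (s, e, t) :: l := pvChunks_flatten text joiners allow_spaces l (s, e, t)
    have hbnd := pvChunkBrk_append_total chunks hchne 0
    rw [hflat] at hbnd
    have hbounds : pvBrk text joiners allow_spaces 1 (((s, e, t) :: l).zip l)
        ++ [((((s, e, t) :: l).length : Nat) : Int)] = pvBndAux 0 chunks := by
      rw [hbrk]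
      simpa using hbnd
    have hem := pvEmitAt_bounds chunks
      (pvChunks_ne_nil text joiners allow_spaces l (s, e, t)) [] ((s, e, t) :: l) (by simp [hflat])
    simp only [List.length_nil, Nat.cast_zero] at hem
    rw [hA]
    simp only [hslice, List.cons_append, List.tail_cons]
    rw [hbounds]
    exact hem.symm
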